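-- pv_equiv track=rewrite | github.com/annekegh/tistools | lib/repptis_msm.py | create_labels_states
-- ===== SOURCE A (Python) =====
-- def create_labels_states(N):
--     """
--     Generate labels for absorbing and non-absorbing states.
--
--     This function creates two separate lists of state labels:
--     - `labels1`: Labels for the two absorbing states (`0-` and `B`).
--     - `labels2`: Labels for the `N-2` non-absorbing states.
--
--     Parameters
--     ----------
--     N : int
--         The total number of states. Must be at least 3.
--
--     Raises
--     ------
--     ValueError
--         If `N` is less than 3.
--
--     Returns
--     -------
--     labels1 : list of str
--         Labels for the two absorbing states.
--     labels2 : list of str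
--         Labels for the `N-2` non-absorbing states.
--     """
--     if N < 3:
--         raise ValueError(f"Expected N >= 3, but got {N}")
--
--     labels1 = ["0-     ", "B      "]
--     labels2 = ["0+- LML", "0+- LMR", "0+- RML", "1+- LML", "1+- LMR"]
--
--     if N > 3:
--         for i in range(1, N - 2):
--             labels2.extend([
--                 f"{i}+- RML",
--                 f"{i}+- RMR",
--                 f"{i+1}+- LML",
--                 f"{i+1}+- LMR"
--             ])
--
--     return labels1, labels2
-- ===== SOURCE B (Python) =====
-- def create_labels_states(N):
--     if N < 3:
--         raise ValueError(f"Expected N >= 3, but got {N}")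
--     labels1 = ["0-     ", "B      "]
--     labels2 = [f"{i}+- {s}"
--                for i in range(N - 1)
--                for s in ("LML", "LMR", "RML", "RMR")
--                if not (i == 0 and s == "RMR")
--                and not (i == N - 2 and s in ("RML", "RMR"))]
--     return labels1, labels2
-- ===== Notes on version B (the rewrite author's own statement) =====
-- stated objective: alternative
-- what changed: labels2 is built as a filtered Cartesian product of state indices 0..N-2 with the four suffixes LML/LMR/RML/RMR, dropping the pairs (0,RMR) and (N-2,RML/RMR), instead of A's hard-coded five-element seed plus a staggered loop mixing entries of index i and i+1.
import Mathlib
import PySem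

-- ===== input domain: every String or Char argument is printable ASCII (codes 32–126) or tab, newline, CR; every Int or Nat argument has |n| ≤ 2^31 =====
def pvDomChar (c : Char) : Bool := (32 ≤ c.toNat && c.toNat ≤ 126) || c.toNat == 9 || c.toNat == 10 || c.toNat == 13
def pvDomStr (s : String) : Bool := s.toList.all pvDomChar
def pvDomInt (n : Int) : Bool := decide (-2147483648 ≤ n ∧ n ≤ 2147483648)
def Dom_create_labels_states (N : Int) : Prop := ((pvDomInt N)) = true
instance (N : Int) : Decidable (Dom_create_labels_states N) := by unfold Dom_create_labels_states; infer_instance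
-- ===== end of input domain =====

-- B builds labels2 as a filtered Cartesian product (index 0..N-2) × (LML,LMR,RML,RMR),
-- dropping (0,RMR) and (N-2,RML/RMR), instead of A's seed plus staggered loop; objective: alternative.

-- ===== PORT A =====
def create_labels_states (N : Int) : List String × List String :=
  let labels1 : List String := ["0-     ", "B      "]
  let labels2 : List String := ["0+- LML", "0+- LMR", "0+- RML", "1+- LML", "1+- LMR"]
  let labels2 :=
    if N > 3 then
      (PySem.List.pyRange 1 (N - 2) 1).foldl (fun acc i =>
        acc ++ [PySem.Int.toStr i ++ "+- RML",
                PySem.Int.toStr i ++ "+- RMR",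
                PySem.Int.toStr (i + 1) ++ "+- LML",
                PySem.Int.toStr (i + 1) ++ "+- LMR"]) labels2
    else labels2
  (labels1, labels2)

-- ===== PORT B =====
-- list comprehension: for i in range(N-1), for s in the suffix tuple, with the filter clause
def create_labels_states_alt (N : Int) : List String × List String :=
  let labels1 : List String := ["0-     ", "B      "]
  let labels2 : List String :=
    (PySem.List.pyRange 0 (N - 1) 1).flatMap (fun i =>
      ((["LML", "LMR", "RML", "RMR"] : List String).filter (fun s =>
          !(i == 0 && s == "RMR")
          && !(i == N - 2 && (s == "RML" || s == "RMR")))).map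
        (fun s => PySem.Int.toStr i ++ "+- " ++ s))
  (labels1, labels2)

-- ===== PRECONDITION & SPEC =====
-- Python A raises ValueError for N < 3; exactly those inputs are excluded.
def Pre_create_labels_states (N : Int) : Prop := 3 ≤ N
instance (N : Int) : Decidable (Pre_create_labels_states N) := by unfold Pre_create_labels_states; infer_instance
def pvWitness_create_labels_states : Int := 5
def Spec_create_labels_states (N : Int) (out : List String × List String) : Prop := out = create_labels_states_alt N
instance (N : Int) (out : List String × List String) : Decidable (Spec_create_labels_states N out) := by unfold Spec_create_labels_states; infer_instance

-- ===== CLAIM (what is proved, stated in full; the proofs are below) =====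
def Claim_equal_create_labels_states : Prop := ∀ (N : Int), Dom_create_labels_states N → Pre_create_labels_states N → Spec_create_labels_states N (create_labels_states N)

-- ===== LEMMAS AND PROOFS =====

-- B's block for one index i (the filtered, mapped suffix list)
def pvBlockB (N i : Int) : List String :=
  ((["LML", "LMR", "RML", "RMR"] : List String).filter (fun s =>
      !(i == 0 && s == "RMR")
      && !(i == N - 2 && (s == "RML" || s == "RMR")))).map
    (fun s => PySem.Int.toStr i ++ "+- " ++ s)

-- grouped four-entry block of index j
def pvFour (j : Int) : List String :=
  [PySem.Int.toStr j ++ "+- LML", PySem.Int.toStr j ++ "+- LMR",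
   PySem.Int.toStr j ++ "+- RML", PySem.Int.toStr j ++ "+- RMR"]

-- the trailing two-entry block (index k)
def pvTwo (k : Int) : List String :=
  [PySem.Int.toStr k ++ "+- LML", PySem.Int.toStr k ++ "+- LMR"]

-- one block of A's loop (index i)
def pvBlockA (i : Int) : List String :=
  [PySem.Int.toStr i ++ "+- RML", PySem.Int.toStr i ++ "+- RMR",
   PySem.Int.toStr (i + 1) ++ "+- LML", PySem.Int.toStr (i + 1) ++ "+- LMR"]

theorem pv_app (j : Int) (s : String) :
    PySem.Int.toStr j ++ "+- " ++ s = PySem.Int.toStr j ++ ("+- " ++ s) :=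
  String.append_assoc

theorem pvBlockB_zero (N : Int) (h : 3 ≤ N) :
    pvBlockB N 0 = ["0+- LML", "0+- LMR", "0+- RML"] := by
  have h2 : ((0 : Int) == N - 2) = false := by
    simp only [beq_eq_false_iff_ne, ne_eq]; omega
  simp [pvBlockB, h2, List.filter, pv_app]
  refine ⟨by decide, by decide, by decide⟩

theorem pvBlockB_last (N : Int) (h : 3 ≤ N) :
    pvBlockB N (N - 2) = pvTwo (N - 2) := by
  have h0 : ((N - 2 : Int) == 0) = false := by
    simp only [beq_eq_false_iff_ne, ne_eq]; omega
  simp [pvBlockB, pvTwo, h0, List.filter, pv_app]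

theorem pvBlockB_mid (N i : Int) (h1 : 1 ≤ i) (h2 : i ≤ N - 3) :
    pvBlockB N i = pvFour i := by
  have h0 : ((i : Int) == 0) = false := by simp only [beq_eq_false_iff_ne, ne_eq]; omega
  have hl : ((i : Int) == N - 2) = false := by simp only [beq_eq_false_iff_ne, ne_eq]; omega
  simp [pvBlockB, pvFour, h0, hl, List.filter, pv_app]

-- the staggered-vs-grouped regrouping identity, by induction on range length
theorem pv_regroup (n : Nat) :
    pvTwo 1 ++ (PySem.List.pyRange 1 ((n : Int) + 1) 1).flatMap pvBlockA
      = (PySem.List.pyRange 1 ((n : Int) + 1) 1).flatMap pvFour ++ pvTwo ((n : Int) + 1) := by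
  induction n with
  | zero => simp [PySem.List.pyRange_one_eq_nil]
  | succ m ih =>
    have h : (((m : Nat) + 1 : Nat) : Int) + 1 = ((m : Int) + 1) + 1 := by push_cast; ring
    rw [h, PySem.List.pyRange_one_succ_right (by omega), List.flatMap_append,
        List.flatMap_append, ← List.append_assoc, ih]
    simp [pvTwo, pvFour, pvBlockA, List.append_assoc]

theorem pv_A2 (N : Int) (h : 3 ≤ N) :
    (create_labels_states N).2
      = ["0+- LML", "0+- LMR", "0+- RML"] ++ pvTwo 1
          ++ (PySem.List.pyRange 1 (N - 2) 1).flatMap pvBlockA := by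
  have h1 : ("1+- LML" : String) = PySem.Int.toStr 1 ++ "+- LML" := by decide
  have h2 : ("1+- LMR" : String) = PySem.Int.toStr 1 ++ "+- LMR" := by decide
  rcases lt_or_ge 3 N with hlt | hge
  · simp only [create_labels_states, if_pos hlt]
    rw [show (fun (acc : List String) (i : Int) =>
          acc ++ [PySem.Int.toStr i ++ "+- RML", PySem.Int.toStr i ++ "+- RMR",
                  PySem.Int.toStr (i + 1) ++ "+- LML", PySem.Int.toStr (i + 1) ++ "+- LMR"])
        = (fun acc i => acc ++ pvBlockA i) from rfl,
        PySem.List.foldl_append_eq_flatMap]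
    simp [pvTwo, h1, h2]
  · have hN : N = 3 := le_antisymm hge h
    subst hN
    simp [create_labels_states, PySem.List.pyRange_one_eq_nil, pvTwo, h1, h2]

theorem pv_B2 (N : Int) (h : 3 ≤ N) :
    (create_labels_states_alt N).2
      = ["0+- LML", "0+- LMR", "0+- RML"]
          ++ (PySem.List.pyRange 1 (N - 2) 1).flatMap pvFour ++ pvTwo (N - 2) := by
  have hB : (create_labels_states_alt N).2
      = (PySem.List.pyRange 0 (N - 1) 1).flatMap (pvBlockB N) := rfl
  rw [hB, PySem.List.pyRange_one_cons (by omega),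
      show (0 : Int) + 1 = 1 from by norm_num,
      show N - 1 = (N - 2) + 1 from by ring,
      PySem.List.pyRange_one_succ_right (by omega)]
  rw [List.flatMap_cons, List.flatMap_append, List.flatMap_cons, List.flatMap_nil,
      List.append_nil, pvBlockB_zero N h, pvBlockB_last N h]
  have hmid : (PySem.List.pyRange 1 (N - 2) 1).flatMap (pvBlockB N)
      = (PySem.List.pyRange 1 (N - 2) 1).flatMap pvFour := by
    apply List.flatMap_congr
    intro i hi
    rw [PySem.List.mem_pyRange_one] at hi
    exact pvBlockB_mid N i (by omega) (by omega)
  rw [hmid, List.append_assoc]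

-- ===== VERDICT (by name: the statement is the Claim_ definition above) =====
theorem create_labels_states_spec : Claim_equal_create_labels_states := by
  intro N _ hPre
  unfold Pre_create_labels_states at hPre
  unfold Spec_create_labels_states
  have h1 : (create_labels_states N).1 = (create_labels_states_alt N).1 := rfl
  obtain ⟨n, hn⟩ : ∃ n : Nat, N - 2 = (n : Int) + 1 := ⟨(N - 3).toNat, by omega⟩
  have h2 : (create_labels_states N).2 = (create_labels_states_alt N).2 := by
    rw [pv_A2 N hPre, pv_B2 N hPre, hn, List.append_assoc, pv_regroup n, List.append_assoc]
  exact Prod.ext h1 h2
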